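-- pv_equiv track=rewrite | github.com/AshutoshSharma-pixel/AstroWord | backend/api/ask.py | build_chart_context
-- ===== SOURCE A (Python) =====
-- def build_chart_context(chart_data: dict, relevant_charts: list) -> str:
--     """Build the chart description using only relevant divisional charts."""
--
--     full_description = chart_data.get("description_text", "")
--
--     # D1 and D9 are always in the description
--     # For additional charts, append their sections
--     additional_context = ""
--
--     chart_sections = {
--         "D10": "D10 Chart (Dashamsha - Career)",
--         "D7": "D7 Chart (Saptamsha - Children)",
--         "D4": "D4 Chart (Chaturthamsha - Property)",
--         "D20": "D20 Chart (Vimshamsha - Spirituality)",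
--         "D24": "D24 Chart (Chaturvimshamsha - Education)",
--         "D30": "D30 Chart (Trimshamsha - Challenges)",
--         "D60": "D60 Chart (Shashtiamsha - Past Life)"
--     }
--
--     for chart in relevant_charts:
--         if chart in ["D1", "D9"]:
--             continue
--         section_key = chart_sections.get(chart, "")
--         if section_key and section_key in full_description:
--             # Extract just this chart's section from the full description
--             start = full_description.find(section_key)
--             # Find next chart section or end
--             next_section = len(full_description)
--             for other_chart in chart_sections.values():
--                 if other_chart != section_key:
--                     pos = full_description.find(other_chart, start + 1)
--                     if pos != -1 and pos < next_section:
--                         next_section = pos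
--             additional_context += full_description[start:next_section] + "\n"
--
--     cut_point = full_description.find("D10")
--     if cut_point != -1:
--         base_desc = full_description[:cut_point]
--     else:
--         # If D10 isn't found, find Vimshottari to use as cut point
--         v_point = full_description.find("Vimshottari Dasha Timeline:")
--         base_desc = full_description[:v_point] if v_point != -1 else full_description
--
--     # Always bring back the timeline and today's date
--     end_point = full_description.find("Vimshottari Dasha Timeline:")
--     end_desc = full_description[end_point:] if end_point != -1 else ""
--
--     return base_desc + additional_context + end_desc
-- ===== SOURCE B (Python) =====
-- def build_chart_context(chart_data: dict, relevant_charts: list) -> str: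
--     """Build the chart description using only relevant divisional charts."""
--
--     desc = chart_data.get("description_text", "")
--
--     chart_sections = {
--         "D10": "D10 Chart (Dashamsha - Career)",
--         "D7": "D7 Chart (Saptamsha - Children)",
--         "D4": "D4 Chart (Chaturthamsha - Property)",
--         "D20": "D20 Chart (Vimshamsha - Spirituality)",
--         "D24": "D24 Chart (Chaturvimshamsha - Education)",
--         "D30": "D30 Chart (Trimshamsha - Challenges)",
--         "D60": "D60 Chart (Shashtiamsha - Past Life)"
--     }
--     headers = list(chart_sections.values())
--     n = len(desc)
--
--     # One pass over the description: every occurrence of every section header,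
--     # in increasing position order (no find() calls inside the chart loop).
--     occ = [(i, h) for i in range(n) for h in headers if desc.startswith(h, i)]
--
--     parts = []
--     for chart in relevant_charts:
--         if chart in ("D1", "D9"):
--             continue
--         key = chart_sections.get(chart, "")
--         starts = [p for p, h in occ if h == key]
--         if key and starts:
--             start = starts[0]
--             end = next((p for p, h in occ if p > start and h != key), n)
--             parts.append(desc[start:end] + "\n")
--     additional_context = "".join(parts)
--
--     cut_point = desc.find("D10")
--     if cut_point != -1:
--         base_desc = desc[:cut_point]
--     else:
--         v_point = desc.find("Vimshottari Dasha Timeline:")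
--         base_desc = desc[:v_point] if v_point != -1 else desc
--
--     end_point = desc.find("Vimshottari Dasha Timeline:")
--     end_desc = desc[end_point:] if end_point != -1 else ""
--
--     return base_desc + additional_context + end_desc
-- ===== Notes on version B (the rewrite author's own statement) =====
-- stated objective: alternative
-- what changed: B replaces A's per-chart rescans of the description (a find per header inside a nested loop) by a single precomputed position-ordered index of all header occurrences; each chart's section start is the first index entry for its header and the section end is the first indexed position past the start with a different header.
import Mathlib
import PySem

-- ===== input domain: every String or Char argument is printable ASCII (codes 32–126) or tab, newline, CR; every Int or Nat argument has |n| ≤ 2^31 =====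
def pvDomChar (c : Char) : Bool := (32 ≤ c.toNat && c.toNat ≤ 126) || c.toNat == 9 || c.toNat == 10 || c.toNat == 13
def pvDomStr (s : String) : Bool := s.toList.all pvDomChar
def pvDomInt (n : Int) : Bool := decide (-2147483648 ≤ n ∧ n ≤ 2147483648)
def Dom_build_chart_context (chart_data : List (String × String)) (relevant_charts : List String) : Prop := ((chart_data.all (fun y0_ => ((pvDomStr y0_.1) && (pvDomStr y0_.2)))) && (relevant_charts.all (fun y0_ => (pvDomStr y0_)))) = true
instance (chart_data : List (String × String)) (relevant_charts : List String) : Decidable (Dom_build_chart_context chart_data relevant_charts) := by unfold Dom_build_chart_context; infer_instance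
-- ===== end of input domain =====

-- B replaces A's per-chart description rescans by one precomputed position-ordered index of all
-- header occurrences (an alternative of similar cost; equal return value proved below).

-- the chart_sections literal dict, shared data of both Pythons
def pvSections : PySem.Dict String String :=
  ⟨[("D10", "D10 Chart (Dashamsha - Career)"),
    ("D7", "D7 Chart (Saptamsha - Children)"),
    ("D4", "D4 Chart (Chaturthamsha - Property)"),
    ("D20", "D20 Chart (Vimshamsha - Spirituality)"),
    ("D24", "D24 Chart (Chaturvimshamsha - Education)"),
    ("D30", "D30 Chart (Trimshamsha - Challenges)"),
    ("D60", "D60 Chart (Shashtiamsha - Past Life)")]⟩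

-- ===== PORT A =====

-- body of A's inner 'for other_chart in chart_sections.values()' loop
def pvA_nextF (desc key : List Char) (s ns : Int) (other : String) : Int :=
  if other.toList ≠ key then
    let pos := PySem.Chars.findFrom desc other.toList (s + 1) none
    if pos ≠ -1 ∧ pos < ns then pos else ns
  else ns

-- A's 'next_section' scan: fold of the inner loop starting at len(full_description)
def pvA_next (desc key : List Char) (s : Int) : Int :=
  pvSections.values.foldl (pvA_nextF desc key s) (desc.length : Int)

-- body of A's 'for chart in relevant_charts' loop (accumulates additional_context)
def pvA_step (desc : List Char) (acc : List Char) (chart : String) : List Char :=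
  if chart = "D1" ∨ chart = "D9" then acc
  else
    let key := (pvSections.getD chart "").toList
    if key ≠ [] ∧ PySem.Chars.isIn key desc = true then
      let start := PySem.Chars.find desc key
      acc ++ PySem.List.slice desc (some start) (some (pvA_next desc key start)) ++ ['\n']
    else acc

def build_chart_context (chart_data : List (String × String)) (relevant_charts : List String) : String :=
  let desc := (PySem.Dict.getD ⟨chart_data⟩ "description_text" "").toList
  let additional := relevant_charts.foldl (pvA_step desc) []
  let cutPoint := PySem.Chars.find desc "D10".toList
  let baseDesc :=
    if cutPoint ≠ -1 then PySem.List.slice desc none (some cutPoint)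
    else
      let vPoint := PySem.Chars.find desc "Vimshottari Dasha Timeline:".toList
      if vPoint ≠ -1 then PySem.List.slice desc none (some vPoint) else desc
  let endPoint := PySem.Chars.find desc "Vimshottari Dasha Timeline:".toList
  let endDesc := if endPoint ≠ -1 then PySem.List.slice desc (some endPoint) none else []
  String.ofList (baseDesc ++ additional ++ endDesc)

-- ===== PORT B =====

-- desc.startswith(h, i) for 0 ≤ i ≤ len(desc) is exactly "h.toList is a prefix of desc.drop i"
-- (ported by hand; exact on that range, the only one B uses)
def pvOccF (desc : List Char) (i : Nat) : List (Int × List Char) :=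
  pvSections.values.filterMap (fun h =>
    if PySem.Chars.startswith (desc.drop i) h.toList = true then some ((i : Int), h.toList) else none)

-- B's occurrence index: every occurrence of every header, in increasing position order
def pvB_occ (desc : List Char) : List (Int × List Char) :=
  (List.range desc.length).flatMap (pvOccF desc)

-- body of B's 'for chart in relevant_charts' loop (collects the parts list)
def pvB_step (desc : List Char) (occ : List (Int × List Char)) (ps : List (List Char)) (chart : String) : List (List Char) :=
  if chart = "D1" ∨ chart = "D9" then ps
  else
    let key := (pvSections.getD chart "").toList
    let starts := (occ.filter (fun e => e.2 == key)).map (·.1)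
    match starts with
    | [] => ps
    | start :: _ =>
      if key ≠ [] then
        let e := (((occ.find? (fun e => decide (start < e.1) && (e.2 != key))).map (·.1)).getD ((desc.length : Int)))
        ps ++ [PySem.List.slice desc (some start) (some e) ++ ['\n']]
      else ps

def build_chart_context_alt (chart_data : List (String × String)) (relevant_charts : List String) : String :=
  let desc := (PySem.Dict.getD ⟨chart_data⟩ "description_text" "").toList
  let occ := pvB_occ desc
  let parts := relevant_charts.foldl (pvB_step desc occ) []
  let additional := parts.flatten
  let cutPoint := PySem.Chars.find desc "D10".toList
  let baseDesc :=
    if cutPoint ≠ -1 then PySem.List.slice desc none (some cutPoint)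
    else
      let vPoint := PySem.Chars.find desc "Vimshottari Dasha Timeline:".toList
      if vPoint ≠ -1 then PySem.List.slice desc none (some vPoint) else desc
  let endPoint := PySem.Chars.find desc "Vimshottari Dasha Timeline:".toList
  let endDesc := if endPoint ≠ -1 then PySem.List.slice desc (some endPoint) none else []
  String.ofList (baseDesc ++ additional ++ endDesc)

-- ===== PRECONDITION & SPEC =====
def Spec_build_chart_context (chart_data : List (String × String)) (relevant_charts : List String) (out : String) : Prop := out = build_chart_context_alt chart_data relevant_charts
instance (chart_data : List (String × String)) (relevant_charts : List String) (out : String) : Decidable (Spec_build_chart_context chart_data relevant_charts out) := by unfold Spec_build_chart_context; infer_instance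

-- ===== CLAIM (what is proved, stated in full; the proofs are below) =====
def Claim_equal_build_chart_context : Prop := ∀ (chart_data : List (String × String)) (relevant_charts : List String), Dom_build_chart_context chart_data relevant_charts → Spec_build_chart_context chart_data relevant_charts (build_chart_context chart_data relevant_charts)

-- ===== LEMMAS AND PROOFS =====

-- every header occurring in chart_sections is a nonempty string
lemma pvValues_ne_nil : ∀ v ∈ pvSections.values, v.toList ≠ [] := by decide

-- chart_sections.get(chart, "") is "" or one of the seven header values
lemma pv_key_cases (chart : String) :
    pvSections.getD chart "" = "" ∨ pvSections.getD chart "" ∈ pvSections.values := by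
  rw [PySem.Dict.getD_eq_get?_getD]
  simp only [pvSections, PySem.Dict.get?_mk_cons, PySem.Dict.values_mk, List.map]
  split_ifs <;> simp [PySem.Dict.get?]

-- A-side contribution of one chart to additional_context
def pvA_contrib (desc : List Char) (chart : String) : List Char :=
  if chart = "D1" ∨ chart = "D9" then []
  else if (pvSections.getD chart "").toList ≠ [] ∧
          PySem.Chars.isIn ((pvSections.getD chart "").toList) desc = true then
    PySem.List.slice desc (some (PySem.Chars.find desc ((pvSections.getD chart "").toList)))
      (some (pvA_next desc ((pvSections.getD chart "").toList)
        (PySem.Chars.find desc ((pvSections.getD chart "").toList)))) ++ ['\n']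
  else []

-- B-side contribution of one chart
def pvB_contrib (desc : List Char) (chart : String) : List Char :=
  if chart = "D1" ∨ chart = "D9" then []
  else
    match (((pvB_occ desc).filter (fun e => e.2 == (pvSections.getD chart "").toList)).map (·.1)) with
    | [] => []
    | start :: _ =>
      if (pvSections.getD chart "").toList ≠ [] then
        PySem.List.slice desc (some start)
          (some ((((pvB_occ desc).find? (fun e => decide (start < e.1) && (e.2 != (pvSections.getD chart "").toList))).map (·.1)).getD ((desc.length : Int)))) ++ ['\n']
      else []

lemma pv_stepA_contrib (desc acc : List Char) (chart : String) :
    pvA_step desc acc chart = acc ++ pvA_contrib desc chart := by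
  simp only [pvA_step, pvA_contrib]
  split_ifs <;> simp

lemma pv_stepB_flatten (desc : List Char) (ps : List (List Char)) (chart : String) :
    (pvB_step desc (pvB_occ desc) ps chart).flatten = ps.flatten ++ pvB_contrib desc chart := by
  simp only [pvB_step, pvB_contrib]
  by_cases hskip : chart = "D1" ∨ chart = "D9"
  · simp [hskip]
  · rw [if_neg hskip, if_neg hskip]
    cases hS : (((pvB_occ desc).filter (fun e => e.2 == (pvSections.getD chart "").toList)).map (·.1)) with
    | nil => simp
    | cons s t =>
      by_cases hk : (pvSections.getD chart "").toList ≠ []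
      · simp [hk]
      · simp [hk]

-- membership in one position-bucket of the occurrence index
lemma pvOccF_mem {desc : List Char} {i : Nat} {e : Int × List Char} (he : e ∈ pvOccF desc i) :
    e.1 = (i : Int) ∧ ∃ v ∈ pvSections.values, e.2 = v.toList ∧ v.toList <+: desc.drop i := by
  simp only [pvOccF, List.mem_filterMap] at he
  obtain ⟨v, hv, hsome⟩ := he
  by_cases hsw : PySem.Chars.startswith (desc.drop i) v.toList = true
  · rw [if_pos hsw] at hsome
    cases hsome
    exact ⟨rfl, v, hv, rfl, (PySem.Chars.startswith_iff _ _).mp hsw⟩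
  · rw [if_neg hsw] at hsome; cases hsome

lemma pvOccF_mem_mk {desc : List Char} {i : Nat} {v : String}
    (hv : v ∈ pvSections.values) (hp : v.toList <+: desc.drop i) :
    ((i : Int), v.toList) ∈ pvOccF desc i := by
  simp only [pvOccF, List.mem_filterMap]
  exact ⟨v, hv, by rw [if_pos ((PySem.Chars.startswith_iff _ _).mpr hp)]⟩

lemma pv_mem_occ {desc : List Char} {e : Int × List Char} :
    e ∈ pvB_occ desc ↔ ∃ i, i < desc.length ∧ e ∈ pvOccF desc i := by
  simp [pvB_occ, List.mem_flatMap, List.mem_range]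

-- find? over a flatMap of range: the found element sits in some bucket and every earlier bucket fails
lemma pv_find?_flatMap_some {α : Type} (f : Nat → List α) (P : α → Bool) (n : Nat) (e : α)
    (h : ((List.range n).flatMap f).find? P = some e) :
    ∃ i, i < n ∧ e ∈ f i ∧ P e = true ∧ ∀ j < i, ∀ x ∈ f j, P x = false := by
  induction n with
  | zero => simp at h
  | succ n ih =>
    rw [List.range_succ, List.flatMap_append, List.find?_append] at h
    cases hA : ((List.range n).flatMap f).find? P with
    | some e' =>
      rw [hA, Option.some_or] at h
      obtain rfl : e' = e := Option.some.inj h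
      obtain ⟨i, hi, h1, h2, h3⟩ := ih hA
      exact ⟨i, by omega, h1, h2, h3⟩
    | none =>
      rw [hA] at h
      simp only [Option.none_or] at h
      simp only [List.flatMap_cons, List.flatMap_nil, List.append_nil] at h
      refine ⟨n, by omega, List.mem_of_find?_eq_some h, List.find?_some h, ?_⟩
      intro j hj x hx
      have := List.find?_eq_none.mp hA x
        (List.mem_flatMap.mpr ⟨j, List.mem_range.mpr hj, hx⟩)
      simpa using this

lemma pv_occ_find?_some {desc : List Char} {P : Int × List Char → Bool} {e : Int × List Char}
    (h : (pvB_occ desc).find? P = some e) :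
    e ∈ pvB_occ desc ∧ P e = true ∧ ∀ e' ∈ pvB_occ desc, P e' = true → e.1 ≤ e'.1 := by
  unfold pvB_occ at h
  obtain ⟨i, hi, hef, hPe, hmin⟩ := pv_find?_flatMap_some (pvOccF desc) P desc.length e h
  refine ⟨pv_mem_occ.mpr ⟨i, hi, hef⟩, hPe, ?_⟩
  intro e' he' hPe'
  obtain ⟨i', hi', hef'⟩ := pv_mem_occ.mp he'
  have h1 := (pvOccF_mem hef).1
  have h1' := (pvOccF_mem hef').1
  by_cases hii : i' < i
  · exact absurd hPe' (by simp [hmin i' hii e' hef'])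
  · rw [h1, h1']; exact_mod_cast by omega

-- a nonempty prefix of desc.drop i forces i < desc.length
lemma pv_pos_lt_length {x s : List Char} {i : Nat} (h : x <+: s.drop i) (hx : x ≠ []) :
    i < s.length := by
  have hle := h.length_le
  rw [List.length_drop] at hle
  cases x with
  | nil => exact absurd rfl hx
  | cons a t => simp at hle; omega

-- a prefix at position i ≥ k is an infix of desc.drop k
lemma pv_prefix_drop_infix {x s : List Char} {k i : Nat} (hki : k ≤ i) (h : x <+: s.drop i) :
    x <:+: s.drop k := by
  obtain ⟨t, ht⟩ := h
  have hdd : (s.drop k).drop (i - k) = s.drop i := by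
    rw [List.drop_drop]; congr 1; omega
  obtain ⟨pre, hpre⟩ := (List.drop_suffix (i - k) (s.drop k))
  refine ⟨pre, t, ?_⟩
  calc pre ++ x ++ t = pre ++ (x ++ t) := by rw [List.append_assoc]
    _ = pre ++ s.drop i := by rw [ht]
    _ = pre ++ (s.drop k).drop (i - k) := by rw [hdd]
    _ = s.drop k := hpre

-- when isIn fails, key has no entry in the occurrence index
lemma pv_starts_none {desc key : List Char} (hin : PySem.Chars.isIn key desc = false) :
    ((pvB_occ desc).filter (fun e => e.2 == key)) = [] := by
  rw [List.filter_eq_nil_iff]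
  intro e he hbeq
  obtain ⟨i, hi, hef⟩ := pv_mem_occ.mp he
  obtain ⟨he1, v, hv, he2, hpre⟩ := pvOccF_mem hef
  have hek : e.2 = key := by simpa using hbeq
  have : PySem.Chars.isIn key desc = true :=
    (PySem.Chars.exists_prefix_drop_iff_isIn key desc).mp ⟨i, by rw [← hek, he2]; exact hpre⟩
  rw [hin] at this; cases this

-- when isIn holds, the first index entry for key is exactly desc.find(key)
lemma pv_starts_some {desc key : List Char} (hne : key ≠ [])
    (hv : ∃ v ∈ pvSections.values, key = v.toList)
    (hin : PySem.Chars.isIn key desc = true) :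
    (∃ tl, (((pvB_occ desc).filter (fun e => e.2 == key)).map (·.1)) = (PySem.Chars.find desc key) :: tl) ∧
    0 ≤ PySem.Chars.find desc key ∧ (PySem.Chars.find desc key).toNat < desc.length := by
  have hinf := (PySem.Chars.isIn_iff_infix key desc).mp hin
  have hf0 : 0 ≤ PySem.Chars.find desc key := (PySem.Chars.find_nonneg_iff desc key).mpr hinf
  obtain ⟨hpre, hmin⟩ := PySem.Chars.find_spec hf0
  have hi0 : (PySem.Chars.find desc key).toNat < desc.length := pv_pos_lt_length hpre hne
  have hment : (((PySem.Chars.find desc key).toNat : Int), key) ∈ pvB_occ desc := by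
    obtain ⟨v, hvm, hkv⟩ := hv
    exact pv_mem_occ.mpr ⟨_, hi0, by rw [hkv]; exact pvOccF_mem_mk hvm (hkv ▸ hpre)⟩
  refine ⟨?_, hf0, hi0⟩
  cases hfind : (pvB_occ desc).find? (fun e => e.2 == key) with
  | none =>
    have := List.find?_eq_none.mp hfind _ hment
    simp at this
  | some e =>
    obtain ⟨heocc, hPe, hemin⟩ := pv_occ_find?_some hfind
    obtain ⟨i, hi, hef⟩ := pv_mem_occ.mp heocc
    obtain ⟨he1, v', hv', he2, hpre'⟩ := pvOccF_mem hef
    have hek : e.2 = key := by simpa using hPe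
    have hkpre : key <+: desc.drop i := by rw [← hek, he2]; exact hpre'
    have hge : (PySem.Chars.find desc key).toNat ≤ i := by
      by_contra hc
      exact hmin i (by omega) hkpre
    have hle : e.1 ≤ ((PySem.Chars.find desc key).toNat : Int) := hemin _ hment (by simp)
    have he1' : e.1 = ((PySem.Chars.find desc key).toNat : Int) := by
      rw [he1]; omega
    have hmap : (((pvB_occ desc).filter (fun e => e.2 == key)).map (·.1)).head? = some e.1 := by
      rw [List.head?_map, List.head?_filter, hfind]; rfl
    cases hS : (((pvB_occ desc).filter (fun e => e.2 == key)).map (·.1)) with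
    | nil => rw [hS] at hmap; cases hmap
    | cons a tl =>
      rw [hS] at hmap
      simp only [List.head?_cons, Option.some.injEq] at hmap
      refine ⟨tl, ?_⟩
      rw [hmap, he1', Int.toNat_of_nonneg hf0]

-- A's inner fold computes the minimum of the valid findFrom results and its initial value
lemma pv_foldA_spec (desc key : List Char) (s : Int) (others : List String) : ∀ init : Int,
    (others.foldl (pvA_nextF desc key s) init = init ∨
      ∃ o ∈ others, o.toList ≠ key ∧ PySem.Chars.findFrom desc o.toList (s + 1) none ≠ -1 ∧
        others.foldl (pvA_nextF desc key s) init = PySem.Chars.findFrom desc o.toList (s + 1) none) ∧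
    others.foldl (pvA_nextF desc key s) init ≤ init ∧
    ∀ o ∈ others, o.toList ≠ key → PySem.Chars.findFrom desc o.toList (s + 1) none ≠ -1 →
      others.foldl (pvA_nextF desc key s) init ≤ PySem.Chars.findFrom desc o.toList (s + 1) none := by
  induction others with
  | nil => intro init; refine ⟨Or.inl rfl, le_refl _, ?_⟩; intro o ho; simp at ho
  | cons o os ih =>
    intro init
    simp only [List.foldl_cons]
    obtain ⟨hdisj, hle, hbnd⟩ := ih (pvA_nextF desc key s init o)
    have hstep : pvA_nextF desc key s init o = init ∨
        (o.toList ≠ key ∧ PySem.Chars.findFrom desc o.toList (s + 1) none ≠ -1 ∧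
         pvA_nextF desc key s init o = PySem.Chars.findFrom desc o.toList (s + 1) none) := by
      simp only [pvA_nextF]
      split_ifs with h1 h2
      · exact Or.inr ⟨h1, h2.1, rfl⟩
      · exact Or.inl rfl
      · exact Or.inl rfl
    refine ⟨?_, ?_, ?_⟩
    · rcases hdisj with h | ⟨o', ho', h1, h2, h3⟩
      · rcases hstep with h' | ⟨h1, h2, h3⟩
        · exact Or.inl (by rw [h, h'])
        · exact Or.inr ⟨o, List.mem_cons_self .., h1, h2, by rw [h, h3]⟩
      · exact Or.inr ⟨o', List.mem_cons_of_mem _ ho', h1, h2, h3⟩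
    · have : pvA_nextF desc key s init o ≤ init := by
        simp only [pvA_nextF]; split_ifs with h1 h2
        · exact le_of_lt h2.2
        · exact le_refl _
        · exact le_refl _
      omega
    · intro o' ho' hk hne
      rcases List.mem_cons.mp ho' with rfl | ho'
      · by_cases hlt : PySem.Chars.findFrom desc o'.toList (s + 1) none < init
        · have : pvA_nextF desc key s init o' = PySem.Chars.findFrom desc o'.toList (s + 1) none := by
            simp only [pvA_nextF]; rw [if_pos hk, if_pos ⟨hne, hlt⟩]
          omega
        · omega
      · exact hbnd o' ho' hk hne

-- entry in the index past s with another header ⇒ that header's findFrom succeeds and bounds it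
lemma pv_alpha {desc key : List Char} {s : Int} (hs0 : 0 ≤ s) {e : Int × List Char}
    (he : e ∈ pvB_occ desc) (hP : (decide (s < e.1) && (e.2 != key)) = true) :
    ∃ o ∈ pvSections.values, o.toList ≠ key ∧
      PySem.Chars.findFrom desc o.toList (s + 1) none ≠ -1 ∧
      PySem.Chars.findFrom desc o.toList (s + 1) none ≤ e.1 := by
  obtain ⟨i, hi, hef⟩ := pv_mem_occ.mp he
  obtain ⟨he1, v, hv, he2, hpre⟩ := pvOccF_mem hef
  simp only [Bool.and_eq_true, decide_eq_true_eq, bne_iff_ne] at hP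
  have hne : v.toList ≠ key := by rw [← he2]; exact hP.2
  have hsi : s < (i : Int) := by rw [← he1]; exact hP.1
  have hk : s + 1 = ((s.toNat + 1 : Nat) : Int) := by omega
  have hki : s.toNat + 1 ≤ i := by omega
  have hkn : s.toNat + 1 ≤ desc.length := by omega
  have hFne : PySem.Chars.findFrom desc v.toList (s + 1) none ≠ -1 := by
    rw [hk]
    rw [Ne, PySem.Chars.findFrom_natCast_eq_neg_one_iff desc v.toList (s.toNat + 1) hkn]
    intro hcon
    exact hcon (pv_prefix_drop_infix hki hpre)
  have hspec := PySem.Chars.findFrom_natCast_spec desc v.toList (s.toNat + 1) hkn (by rw [← hk]; exact hFne)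
  refine ⟨v, hv, hne, hFne, ?_⟩
  rw [hk]
  have hnotlt : ¬ i < (PySem.Chars.findFrom desc v.toList ((s.toNat + 1 : Nat) : Int) none).toNat := by
    intro hc
    exact hspec.2.2 i hki hc hpre
  rw [he1]
  omega

-- a successful findFrom of another header yields an index entry at its result
lemma pv_beta {desc key : List Char} {s : Int} (hs0 : 0 ≤ s) (hsn : s.toNat < desc.length)
    {o : String} (ho : o ∈ pvSections.values) (hne : o.toList ≠ key)
    (hF : PySem.Chars.findFrom desc o.toList (s + 1) none ≠ -1) :
    ∃ e ∈ pvB_occ desc, (decide (s < e.1) && (e.2 != key)) = true ∧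
      e.1 = PySem.Chars.findFrom desc o.toList (s + 1) none := by
  have hk : s + 1 = ((s.toNat + 1 : Nat) : Int) := by omega
  have hkn : s.toNat + 1 ≤ desc.length := by omega
  rw [hk] at hF ⊢
  obtain ⟨hge, hpre, hmin⟩ := PySem.Chars.findFrom_natCast_spec desc o.toList (s.toNat + 1) hkn hF
  set F := PySem.Chars.findFrom desc o.toList ((s.toNat + 1 : Nat) : Int) none with hFdef
  have hF0 : 0 ≤ F := le_trans (by omega) hge
  have hFi : F = (F.toNat : Int) := (Int.toNat_of_nonneg hF0).symm
  have hiN : F.toNat < desc.length := pv_pos_lt_length hpre (pvValues_ne_nil o ho)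
  refine ⟨((F.toNat : Int), o.toList), pv_mem_occ.mpr ⟨F.toNat, hiN, pvOccF_mem_mk ho hpre⟩, ?_, by rw [← hFi]⟩
  simp only [Bool.and_eq_true, decide_eq_true_eq, bne_iff_ne]
  exact ⟨by omega, hne⟩

-- the heart: A's nested rescan and B's indexed lookup compute the same section end
lemma pv_next_eq (desc key : List Char) (s : Int) (hs0 : 0 ≤ s) (hsn : s.toNat < desc.length) :
    pvA_next desc key s =
      (((pvB_occ desc).find? (fun e => decide (s < e.1) && (e.2 != key))).map (·.1)).getD ((desc.length : Int)) := by
  obtain ⟨hdisj, hle, hbnd⟩ := pv_foldA_spec desc key s pvSections.values (desc.length : Int)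
  cases hfind : (pvB_occ desc).find? (fun e => decide (s < e.1) && (e.2 != key)) with
  | none =>
    simp only [Option.map_none, Option.getD_none]
    rcases hdisj with h | ⟨o, ho, h1, h2, h3⟩
    · exact h
    · exfalso
      obtain ⟨e, he, hPe, _⟩ := pv_beta hs0 hsn ho h1 h2
      have := List.find?_eq_none.mp hfind e he
      rw [hPe] at this
      exact this rfl
  | some e =>
    simp only [Option.map_some, Option.getD_some]
    obtain ⟨heocc, hPe, hemin⟩ := pv_occ_find?_some hfind
    obtain ⟨o, ho, hone, hFne, hFle⟩ := pv_alpha hs0 heocc hPe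
    have hA_le : pvA_next desc key s ≤ e.1 :=
      le_trans (hbnd o ho hone hFne) hFle
    have hA_ge : e.1 ≤ pvA_next desc key s := by
      rcases hdisj with h | ⟨o', ho', h1, h2, h3⟩
      · obtain ⟨i, hi, hef⟩ := pv_mem_occ.mp heocc
        have he1 := (pvOccF_mem hef).1
        unfold pvA_next
        rw [h, he1]
        exact_mod_cast by omega
      · obtain ⟨e', he', hPe', he'1⟩ := pv_beta hs0 hsn ho' h1 h2
        unfold pvA_next
        rw [h3, ← he'1]
        exact hemin e' he' hPe'
    exact le_antisymm hA_le hA_ge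

-- per-chart contributions agree
lemma pv_contrib_eq (desc : List Char) (chart : String) :
    pvA_contrib desc chart = pvB_contrib desc chart := by
  unfold pvA_contrib pvB_contrib
  by_cases hskip : chart = "D1" ∨ chart = "D9"
  · simp [hskip]
  rw [if_neg hskip, if_neg hskip]
  rcases pv_key_cases chart with h0 | hv
  · rw [h0]
    cases hS : (((pvB_occ desc).filter (fun e => e.2 == ("" : String).toList)).map (·.1)) with
    | nil => simp
    | cons a t => simp
  · have hKne : (pvSections.getD chart "").toList ≠ [] := pvValues_ne_nil _ hv
    have hvex : ∃ v ∈ pvSections.values, (pvSections.getD chart "").toList = v.toList := ⟨_, hv, rfl⟩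
    by_cases hin : PySem.Chars.isIn ((pvSections.getD chart "").toList) desc = true
    · obtain ⟨⟨tl, hS⟩, hf0, hfl⟩ := pv_starts_some hKne hvex hin
      rw [if_pos ⟨hKne, hin⟩, hS]
      simp only [if_pos hKne]
      rw [← pv_next_eq desc _ _ hf0 hfl]
    · have hfilter := pv_starts_none (desc := desc) (key := (pvSections.getD chart "").toList)
        (by simpa using hin)
      rw [if_neg (fun hc => hin hc.2), hfilter]
      simp

lemma pv_fold_eq (desc : List Char) (l : List String) : ∀ (acc : List Char) (ps : List (List Char)),
    acc = ps.flatten →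
    l.foldl (pvA_step desc) acc = (l.foldl (pvB_step desc (pvB_occ desc)) ps).flatten := by
  induction l with
  | nil => intro acc ps h; simpa using h
  | cons c t ih =>
    intro acc ps h
    simp only [List.foldl_cons]
    exact ih _ _ (by rw [pv_stepA_contrib, pv_stepB_flatten, h, pv_contrib_eq])

-- ===== VERDICT (by name: the statement is the Claim_ definition above) =====
theorem build_chart_context_spec : Claim_equal_build_chart_context := by
  intro chart_data relevant_charts _
  unfold Spec_build_chart_context
  simp only [build_chart_context, build_chart_context_alt]
  rw [pv_fold_eq _ _ [] [] rfl]
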